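-- pv_equiv track=rewrite | github.com/2SOOY/problem-solving | boj_수묶기.py | solution
-- ===== SOURCE A (Python) =====
-- def calculate(nums):
--     answer = 0
--
--     while nums:
--         if len(nums) >= 2:
--             n1, n2 = nums.pop(), nums.pop() # 두 수 추출
--
--             multi = n1 * n2
--             plus = n1 + n2 # plus를 구하는 이유 1,1 같은 경우 => 1 + 1 > 1 * 1
--
--             answer += max(multi, plus)
--
--         else:
--             answer += nums.pop()
--
--     return answer
--
-- def solution(N, numbers):
--     answer = 0
--
--     # 1. 양수, 음수, 0 집합 각각 구하기
--     plus_nums = [num for num in numbers if num > 0]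
--     minus_nums = [num for num in numbers if num < 0]
--     zeros = [num for num in numbers if num == 0]
--
--     # 2. 정렬하기
--     # 양수집합은 오름차순, 음수집합은 내림차순
--     if plus_nums:
--         plus_nums.sort()
--
--     if minus_nums:
--         minus_nums.sort(reverse=True)
--
--     # 3. 음수 집합의 길이가 홀수 & 0이 존재한다면 => 묶어서 음수 제거 가능
--     if zeros and len(minus_nums) % 2:
--         minus_nums = minus_nums[1:]
--
--     # 4. 주어진 양수, 음수 집합 계산하기
--     answer += calculate(plus_nums)
--     answer += calculate(minus_nums)
--
--     return answer
-- ===== SOURCE B (Python) =====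
-- def solution(N, numbers):
--     s = sorted(numbers)
--     neg = len([x for x in s if x < 0])
--     zero = len([x for x in s if x == 0])
--     total = 0
--     i = 0
--     while i + 1 < neg:
--         total += s[i] * s[i + 1]
--         i += 2
--     if i < neg and zero == 0:
--         total += s[i]
--     lo = neg + zero
--     j = len(s) - 1
--     while j - 1 >= lo:
--         total += max(s[j] * s[j - 1], s[j] + s[j - 1])
--         j -= 2
--     if j >= lo:
--         total += s[j]
--     return total
-- ===== Notes on version B (the rewrite author's own statement) =====
-- stated objective: alternative
-- what changed: B sorts the list once (a copy, no mutation) and walks the negative prefix forward and the positive suffix backward by index, replacing A's three filters, two separate sorts (one reversed), the [1:] slice and the destructive pop-based calculate helper.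
import Mathlib
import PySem

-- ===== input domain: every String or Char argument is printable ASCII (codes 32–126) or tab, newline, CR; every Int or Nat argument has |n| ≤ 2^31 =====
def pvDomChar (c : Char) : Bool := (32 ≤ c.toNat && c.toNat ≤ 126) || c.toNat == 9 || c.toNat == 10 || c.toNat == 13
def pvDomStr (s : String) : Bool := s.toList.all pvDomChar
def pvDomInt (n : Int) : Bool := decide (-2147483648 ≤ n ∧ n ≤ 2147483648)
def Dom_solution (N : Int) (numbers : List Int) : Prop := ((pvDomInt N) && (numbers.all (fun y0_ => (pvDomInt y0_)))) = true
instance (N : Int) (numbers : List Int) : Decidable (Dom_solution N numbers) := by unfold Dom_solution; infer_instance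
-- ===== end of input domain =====

-- B sorts the input once (a copy, no mutation) and pairs by index from the two ends of the
-- sorted list, replacing A's filter/sort-twice/pop-based-helper pipeline (objective: alternative).

-- ===== PORT A =====
-- literal port of calculate: 'while nums: pop two from the end (or one), add max(product, sum)'
def calcA (nums : List Int) : Int :=
  match h : PySem.List.pop? nums (-1) with
  | none => 0                                -- while condition false: nums empty
  | some (n1, r1) =>
    if nums.length ≥ 2 then
      match h2 : PySem.List.pop? r1 (-1) with
      | none => 0                            -- unreachable: len(nums) ≥ 2
      | some (n2, r2) => max (n1 * n2) (n1 + n2) + calcA r2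
    else n1
termination_by nums.length
decreasing_by
  have a1 := PySem.List.length_of_pop?_eq_some nums h
  have a2 := PySem.List.length_of_pop?_eq_some r1 h2
  simp at a1 a2; omega

def solution (N : Int) (numbers : List Int) : Int :=
  let plus0 := numbers.filter (fun num => decide (num > 0))
  let minus0 := numbers.filter (fun num => decide (num < 0))
  let zeros := numbers.filter (fun num => decide (num = 0))
  let plus := if plus0.isEmpty then plus0 else PySem.List.sorted plus0 (fun x => x) false
  let minus1 := if minus0.isEmpty then minus0 else PySem.List.sorted minus0 (fun x => x) true
  let minus := if ¬ zeros.isEmpty ∧ PySem.Int.mod (minus1.length : Int) 2 ≠ 0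
               then PySem.List.slice minus1 (some 1) none else minus1   -- minus_nums[1:]
  0 + calcA plus + calcA minus

-- ===== PORT B =====
-- while i + 1 < neg: total += s[i] * s[i+1]; i += 2   (returns the final (total, i))
def negLoop (s : List Int) (neg : Nat) (total : Int) (i : Nat) : Int × Nat :=
  if i + 1 < neg then
    negLoop s neg (total + PySem.List.pyGetD s (i : Int) 0 * PySem.List.pyGetD s ((i : Int) + 1) 0) (i + 2)
  else (total, i)
termination_by neg - i

-- while j - 1 >= lo: total += max(s[j]*s[j-1], s[j]+s[j-1]); j -= 2   (returns the final (total, j))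
def posLoop (s : List Int) (lo : Int) (total : Int) (j : Int) : Int × Int :=
  if lo ≤ j - 1 then
    posLoop s lo (total + max (PySem.List.pyGetD s j 0 * PySem.List.pyGetD s (j - 1) 0)
                              (PySem.List.pyGetD s j 0 + PySem.List.pyGetD s (j - 1) 0)) (j - 2)
  else (total, j)
termination_by (j + 1 - lo).toNat
decreasing_by omega

def solution_alt (N : Int) (numbers : List Int) : Int :=
  let s := PySem.List.sorted numbers (fun x => x) false
  let neg := (s.filter (fun x => decide (x < 0))).length
  let zero := (s.filter (fun x => decide (x = 0))).length
  let p1 := negLoop s neg 0 0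
  let t2 := if p1.2 < neg ∧ zero = 0 then p1.1 + PySem.List.pyGetD s (p1.2 : Int) 0 else p1.1
  let lo : Int := ((neg + zero : Nat) : Int)
  let p3 := posLoop s lo t2 ((s.length : Int) - 1)
  if lo ≤ p3.2 then p3.1 + PySem.List.pyGetD s p3.2 0 else p3.1

-- ===== PRECONDITION & SPEC =====
def Spec_solution (N : Int) (numbers : List Int) (out : Int) : Prop := out = solution_alt N numbers
instance (N : Int) (numbers : List Int) (out : Int) : Decidable (Spec_solution N numbers out) := by unfold Spec_solution; infer_instance

-- ===== CLAIM (what is proved, stated in full; the proofs are below) =====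
def Claim_equal_solution : Prop := ∀ (N : Int) (numbers : List Int), Dom_solution N numbers → Spec_solution N numbers (solution N numbers)

-- ===== LEMMAS AND PROOFS =====

-- front pairing with max(product, sum), leftover single added (calcA seen from the far end)
def pairF : List Int → Int
  | x :: y :: t => max (x * y) (x + y) + pairF t
  | [x] => x
  | [] => 0

-- front pairing, plain products, leftover dropped (B's negative walk)
def pairE : List Int → Int
  | x :: y :: t => x * y + pairE t
  | _ => 0

-- front pairing with max(product, sum), leftover dropped (B's positive walk, seen reversed)
def pairM : List Int → Int
  | x :: y :: t => max (x * y) (x + y) + pairM t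
  | _ => 0

lemma calcA_nil : calcA [] = 0 := by
  rw [calcA]
  split
  · rfl
  · next n1 r1 heq => simp [PySem.List.pop?, PySem.List.pyIdx?] at heq

lemma calcA_singleton (x : Int) : calcA [x] = x := by
  rw [calcA]
  split
  · next heq => rw [show ([x] : List Int) = [] ++ [x] by simp, PySem.List.pop?_last] at heq; cases heq
  · next n1 r1 heq =>
      rw [show ([x] : List Int) = [] ++ [x] by simp, PySem.List.pop?_last] at heq
      injection heq with h; injection h with ha hb; subst ha
      simp

lemma calcA_snoc2 (t1 : List Int) (y x : Int) :
    calcA ((t1 ++ [y]) ++ [x]) = max (x * y) (x + y) + calcA t1 := by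
  rw [calcA]
  split
  · next heq => rw [PySem.List.pop?_last] at heq; cases heq
  · next n1 r1 heq =>
      rw [PySem.List.pop?_last] at heq
      injection heq with h; injection h with ha hb; subst ha; subst hb
      have hlen : ((t1 ++ [y]) ++ [x]).length ≥ 2 := by simp
      rw [if_pos hlen]
      split
      · next heq2 => rw [PySem.List.pop?_last] at heq2; cases heq2
      · next n2 r2 heq2 =>
          rw [PySem.List.pop?_last] at heq2
          injection heq2 with h2; injection h2 with hc hd; subst hc; subst hd
          rfl

theorem calcA_reverse (a : List Int) : calcA a.reverse = pairF a := by
  induction a using pairF.induct with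
  | case1 x y t ih =>
      have h1 : (x :: y :: t).reverse = (t.reverse ++ [y]) ++ [x] := by simp
      rw [h1, calcA_snoc2, ih, pairF]
  | case2 x => simp [calcA_singleton, pairF]
  | case3 => simp [calcA_nil, pairF]

lemma three_filter_perm (numbers : List Int) :
    (numbers.filter (fun n => decide (n < 0)) ++ (numbers.filter (fun n => decide (n = 0))
      ++ numbers.filter (fun n => decide (n > 0)))).Perm numbers := by
  induction numbers with
  | nil => simp
  | cons x t ih =>
      simp only [List.filter_cons]
      rcases lt_trichotomy x 0 with h | h | h
      · simp only [decide_eq_true_eq, if_pos h, if_neg (show ¬ x = 0 by omega),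
          if_neg (show ¬ x > 0 by omega), List.cons_append]
        exact ih.cons x
      · subst h
        simp only [decide_eq_true_eq, if_neg (show ¬ (0:Int) < 0 by omega),
          if_pos rfl]
        exact List.Perm.trans List.perm_middle (ih.cons 0)
      · simp only [decide_eq_true_eq, if_neg (show ¬ x < 0 by omega),
          if_neg (show ¬ x = 0 by omega), if_pos h, ← List.append_assoc]
        exact List.Perm.trans List.perm_middle (by simpa [List.append_assoc] using ih.cons x)

theorem sorted_decomp (numbers : List Int) :
    PySem.List.sorted numbers (fun x => x) false =
      PySem.List.sorted (numbers.filter (fun n => decide (n < 0))) (fun x => x) false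
      ++ (numbers.filter (fun n => decide (n = 0))
      ++ PySem.List.sorted (numbers.filter (fun n => decide (n > 0))) (fun x => x) false) := by
  apply PySem.List.sorted_id_eq_of_perm_of_pairwise
  · exact ((PySem.List.sorted_perm _ _ _).append
      ((List.Perm.refl _).append (PySem.List.sorted_perm _ _ _))).trans (three_filter_perm numbers)
  · have hn : ∀ x ∈ PySem.List.sorted (numbers.filter (fun n => decide (n < 0))) (fun x => x) false, x < 0 := by
      intro x hx
      have := (PySem.List.mem_sorted _ _ _ _).1 hx
      simpa using (List.mem_filter.1 this).2
    have hz : ∀ x ∈ numbers.filter (fun n => decide (n = 0)), x = 0 := by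
      intro x hx; simpa using (List.mem_filter.1 hx).2
    have hp : ∀ x ∈ PySem.List.sorted (numbers.filter (fun n => decide (n > 0))) (fun x => x) false, 0 < x := by
      intro x hx
      have := (PySem.List.mem_sorted _ _ _ _).1 hx
      simpa using (List.mem_filter.1 this).2
    rw [List.pairwise_append]
    refine ⟨by simpa using PySem.List.sorted_pairwise _ (fun x : Int => x), ?_, ?_⟩
    · rw [List.pairwise_append]
      refine ⟨List.pairwise_of_forall_mem_list (fun a ha b hb => by rw [hz a ha, hz b hb]),
        by simpa using PySem.List.sorted_pairwise _ (fun x : Int => x), ?_⟩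
      intro a ha b hb
      have := hz a ha; have := hp b hb; omega
    · intro a ha b hb
      have ha' := hn a ha
      rcases List.mem_append.1 hb with hb | hb
      · have := hz b hb; omega
      · have := hp b hb; omega

theorem sorted_rev_eq_reverse (xs : List Int) :
    PySem.List.sorted xs (fun x => x) true = (PySem.List.sorted xs (fun x => x) false).reverse := by
  apply PySem.List.eq_of_perm_of_pairwise_le_of_injective (key := fun x : Int => -x) neg_injective
  · exact (PySem.List.sorted_perm _ _ _).trans
      ((List.reverse_perm _).trans (PySem.List.sorted_perm _ _ _)).symm
  · exact (PySem.List.sorted_pairwise_rev _ _).imp (by intro a b h; simpa using h)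
  · rw [List.pairwise_reverse]
    exact (PySem.List.sorted_pairwise _ _).imp (by intro a b h; simpa using h)

lemma pyGetD_prefix (c m : List Int) (x : Int) :
    PySem.List.pyGetD (c ++ x :: m) (c.length : Int) 0 = x := by
  rw [PySem.List.pyGetD_natCast]
  simp [List.getD_eq_getElem?_getD]

theorem negLoop_spec (a : List Int) : ∀ (c r : List Int) (total : Int),
    negLoop (c ++ (a ++ r)) (c.length + a.length) total c.length =
      (total + pairE a, c.length + (a.length - a.length % 2)) := by
  induction a using pairE.induct with
  | case1 x y t ih =>
      intro c r total
      rw [negLoop, if_pos (by simp only [List.length_cons]; omega)]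
      have e1 : PySem.List.pyGetD (c ++ (x :: y :: t ++ r)) (c.length : Int) 0 = x :=
        pyGetD_prefix c _ x
      have e2 : PySem.List.pyGetD (c ++ (x :: y :: t ++ r)) ((c.length : Int) + 1) 0 = y := by
        have : (c.length : Int) + 1 = ((c ++ [x]).length : Nat) := by simp
        rw [this]
        have : c ++ (x :: y :: t ++ r) = (c ++ [x]) ++ (y :: (t ++ r)) := by simp
        rw [this]
        exact pyGetD_prefix (c ++ [x]) _ y
      rw [e1, e2]
      have hs : c ++ (x :: y :: t ++ r) = (c ++ [x, y]) ++ (t ++ r) := by simp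
      have hi : c.length + 2 = (c ++ [x, y]).length := by simp
      have hn : c.length + (x :: y :: t).length = (c ++ [x, y]).length + t.length := by simp; omega
      rw [hs, hi, hn, ih (c ++ [x, y]) r]
      simp only [Prod.mk.injEq, pairE, List.length_cons, List.length_append]
      constructor
      · ring
      · simp; omega
  | case2 a h =>
      intro c r total
      match a with
      | [] => rw [negLoop, if_neg (by simp)]; simp [pairE]
      | [x] => rw [negLoop, if_neg (by simp)]; simp [pairE]
      | x :: y :: t => exact absurd rfl (h x y t)

theorem posLoop_spec (q : List Int) : ∀ (c e : List Int) (total : Int),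
    posLoop (c ++ (q.reverse ++ e)) (c.length : Int) total ((c.length : Int) + q.length - 1) =
      (total + pairM q, (c.length : Int) - 1 + ((q.length % 2 : Nat) : Int)) := by
  induction q using pairM.induct with
  | case1 x y t ih =>
      intro c e total
      rw [posLoop, if_pos (by simp only [List.length_cons]; push_cast; omega)]
      have hx : (c.length : Int) + (x :: y :: t).length - 1 = (((c ++ (t.reverse ++ [y])).length : Nat) : Int) := by
        simp; omega
      have hsx : c ++ ((x :: y :: t).reverse ++ e) = (c ++ (t.reverse ++ [y])) ++ (x :: e) := by simp
      have e1 : PySem.List.pyGetD (c ++ ((x :: y :: t).reverse ++ e)) ((c.length : Int) + (x :: y :: t).length - 1) 0 = x := by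
        rw [hx, hsx]; exact pyGetD_prefix _ _ x
      have hy : (c.length : Int) + (x :: y :: t).length - 1 - 1 = (((c ++ t.reverse).length : Nat) : Int) := by
        simp; omega
      have hsy : c ++ ((x :: y :: t).reverse ++ e) = (c ++ t.reverse) ++ (y :: x :: e) := by simp
      have e2 : PySem.List.pyGetD (c ++ ((x :: y :: t).reverse ++ e)) ((c.length : Int) + (x :: y :: t).length - 1 - 1) 0 = y := by
        rw [hy, hsy]; exact pyGetD_prefix _ _ y
      rw [e1, e2]
      have hs2 : c ++ ((x :: y :: t).reverse ++ e) = c ++ (t.reverse ++ ([y, x] ++ e)) := by simp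
      have hj2 : (c.length : Int) + (x :: y :: t).length - 1 - 2 = (c.length : Int) + t.length - 1 := by
        simp only [List.length_cons]; push_cast; omega
      rw [hs2, hj2, ih c ([y, x] ++ e)]
      simp only [Prod.mk.injEq, pairM, List.length_cons]
      constructor
      · ring
      · push_cast; omega
  | case2 q h =>
      intro c e total
      match q with
      | [] =>
          rw [posLoop, if_neg (by simp only [List.length_nil]; omega)]
          simp only [Prod.mk.injEq, pairM, List.length_nil]
          constructor
          · ring
          · push_cast; omega
      | [x] =>
          rw [posLoop, if_neg (by simp only [List.length_cons, List.length_nil]; omega)]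
          simp only [Prod.mk.injEq, pairM, List.length_cons, List.length_nil]
          constructor
          · ring
          · push_cast; omega
      | x :: y :: t => exact absurd rfl (h x y t)

lemma pairF_eq_pairM_add (l : List Int) :
    pairF l = pairM l + (if l.length % 2 = 1 then l.getLast?.getD 0 else 0) := by
  induction l using pairF.induct with
  | case1 x y t ih =>
      rw [pairF, pairM.eq_def]
      match t with
      | [] => simp [pairF, pairM]
      | z :: t' => simp only [List.length_cons, List.getLast?_cons_cons] at *; rw [ih]; ring_nf; omega
  | case2 x => simp [pairF, pairM]
  | case3 => simp [pairF, pairM]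

lemma pairM_eq_pairE (l : List Int) (h : ∀ x ∈ l, x < 0) : pairM l = pairE l := by
  induction l using pairM.induct with
  | case1 x y t ih =>
      have hx : x < 0 := h x (by simp)
      have hy : y < 0 := h y (by simp)
      have h1 : (1:Int) ≤ x * y := by nlinarith
      have h2 : x + y ≤ x * y := by omega
      rw [pairM, pairE, max_eq_left h2, ih (fun z hz => h z (by simp [hz]))]
  | case2 l h' =>
      match l with
      | [] => rfl
      | [x] => rfl
      | x :: y :: t => exact absurd rfl (h' x y t)

lemma pairE_dropLast (l : List Int) (h : l.length % 2 = 1) : pairE l.dropLast = pairE l := by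
  induction l using pairE.induct with
  | case1 x y t ih =>
      have ht : t ≠ [] := by intro hh; subst hh; simp at h
      have : (x :: y :: t).dropLast = x :: y :: t.dropLast := by
        match t, ht with | z :: t', _ => simp
      rw [this, pairE, pairE, ih (by simp at h ⊢; omega)]
  | case2 l h' =>
      match l with
      | [] => simp at h
      | [x] => rfl
      | x :: y :: t => exact absurd rfl (h' x y t)

lemma reverse_drop_one (l : List Int) : l.reverse.drop 1 = l.dropLast.reverse := by
  rcases eq_or_ne l [] with h | h
  · subst h; rfl
  · conv_lhs => rw [← List.dropLast_append_getLast h]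
    simp

-- shorthand for the three sorted blocks of the input (proof-only)
def NsOf (numbers : List Int) : List Int :=
  PySem.List.sorted (numbers.filter (fun n => decide (n < 0))) (fun x => x) false
def ZfOf (numbers : List Int) : List Int := numbers.filter (fun n => decide (n = 0))
def PsOf (numbers : List Int) : List Int :=
  PySem.List.sorted (numbers.filter (fun n => decide (n > 0))) (fun x => x) false

lemma NsOf_mem_neg (numbers : List Int) : ∀ x ∈ NsOf numbers, x < 0 := by
  intro x hx
  have := (PySem.List.mem_sorted _ _ _ _).1 hx
  simpa using (List.mem_filter.1 this).2

lemma ZfOf_mem_zero (numbers : List Int) : ∀ x ∈ ZfOf numbers, x = 0 := by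
  intro x hx; simpa using (List.mem_filter.1 hx).2

lemma PsOf_mem_pos (numbers : List Int) : ∀ x ∈ PsOf numbers, 0 < x := by
  intro x hx
  have := (PySem.List.mem_sorted _ _ _ _).1 hx
  simpa using (List.mem_filter.1 this).2

lemma pyGetD_block_last (a rest : List Int) (h : a ≠ []) :
    PySem.List.pyGetD (a ++ rest) (((a.length - 1 : Nat) : Nat) : Int) 0 = a.getLast?.getD 0 := by
  rcases List.eq_nil_or_concat a with rfl | ⟨dl, g, rfl⟩
  · exact absurd rfl h
  · simp only [List.concat_eq_append]
    have h1 : (dl ++ [g]).length - 1 = dl.length := by simp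
    have h2 : (dl ++ [g]) ++ rest = dl ++ (g :: rest) := by simp
    rw [h1, h2, pyGetD_prefix]
    simp

lemma solution_eq (N : Int) (numbers : List Int) :
    solution N numbers =
      pairF (PsOf numbers).reverse +
      (if ZfOf numbers ≠ [] ∧ (NsOf numbers).length % 2 = 1
       then pairF (NsOf numbers).dropLast else pairF (NsOf numbers)) := by
  simp only [solution]
  have hplus : (if (numbers.filter (fun num => decide (num > 0))).isEmpty = true
      then numbers.filter (fun num => decide (num > 0))
      else PySem.List.sorted (numbers.filter (fun num => decide (num > 0))) (fun x => x) false)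
      = PsOf numbers := by
    by_cases h : (numbers.filter (fun num => decide (num > 0))).isEmpty = true
    · rw [if_pos h]
      rw [List.isEmpty_iff] at h
      rw [PsOf, h]
      rfl
    · rw [if_neg h]; rfl
  have hminus : (if (numbers.filter (fun num => decide (num < 0))).isEmpty = true
      then numbers.filter (fun num => decide (num < 0))
      else PySem.List.sorted (numbers.filter (fun num => decide (num < 0))) (fun x => x) true)
      = (NsOf numbers).reverse := by
    by_cases h : (numbers.filter (fun num => decide (num < 0))).isEmpty = true
    · rw [if_pos h]
      rw [List.isEmpty_iff] at h
      rw [NsOf, h]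
      rfl
    · rw [if_neg h, sorted_rev_eq_reverse]; rfl
  rw [hplus, hminus]
  have hcalcP : calcA (PsOf numbers) = pairF (PsOf numbers).reverse := by
    have := calcA_reverse (PsOf numbers).reverse
    rwa [List.reverse_reverse] at this
  have hmodiff : (¬ (numbers.filter (fun num => decide (num = 0))).isEmpty = true ∧
        PySem.Int.mod (((NsOf numbers).reverse.length : Nat) : Int) 2 ≠ 0)
      ↔ (ZfOf numbers ≠ [] ∧ (NsOf numbers).length % 2 = 1) := by
    rw [PySem.Int.mod_eq_emod_of_pos (by norm_num)]
    constructor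
    · rintro ⟨h1, h2⟩
      refine ⟨by simpa [ZfOf, List.isEmpty_iff] using h1, ?_⟩
      simp only [List.length_reverse] at h2; omega
    · rintro ⟨h1, h2⟩
      refine ⟨by simpa [ZfOf, List.isEmpty_iff] using h1, ?_⟩
      simp only [List.length_reverse]; omega
  by_cases hc : ZfOf numbers ≠ [] ∧ (NsOf numbers).length % 2 = 1
  · rw [if_pos (hmodiff.2 hc), if_pos hc, hcalcP]
    rw [PySem.List.slice_from _ (by norm_num : (0:Int) ≤ 1)]
    have : ((1:Int)).toNat = 1 := rfl
    rw [this, reverse_drop_one, calcA_reverse]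
    ring
  · rw [if_neg (fun h => hc (hmodiff.1 h)), if_neg hc, hcalcP, calcA_reverse]
    ring

lemma alt_eq (N : Int) (numbers : List Int) :
    solution_alt N numbers =
      pairE (NsOf numbers) +
      (if (NsOf numbers).length % 2 = 1 ∧ ZfOf numbers = []
       then (NsOf numbers).getLast?.getD 0 else 0) +
      pairM (PsOf numbers).reverse +
      (if (PsOf numbers).length % 2 = 1 then (PsOf numbers).head?.getD 0 else 0) := by
  simp only [solution_alt]
  have hs : PySem.List.sorted numbers (fun x => x) false
      = NsOf numbers ++ (ZfOf numbers ++ PsOf numbers) := sorted_decomp numbers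
  rw [hs]
  set Ns := NsOf numbers with hNs
  set Zf := ZfOf numbers with hZf
  set Ps := PsOf numbers with hPs
  have hfneg : (Ns ++ (Zf ++ Ps)).filter (fun x => decide (x < 0)) = Ns := by
    rw [List.filter_append, List.filter_append]
    rw [List.filter_eq_self.mpr (fun a ha => by simpa using NsOf_mem_neg numbers a ha),
      List.filter_eq_nil_iff.mpr (fun a ha => by
        have := ZfOf_mem_zero numbers a ha; simp; omega),
      List.filter_eq_nil_iff.mpr (fun a ha => by
        have := PsOf_mem_pos numbers a ha; simp; omega)]
    simp
  have hfzero : (Ns ++ (Zf ++ Ps)).filter (fun x => decide (x = 0)) = Zf := by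
    rw [List.filter_append, List.filter_append]
    rw [List.filter_eq_nil_iff.mpr (fun a ha => by
        have := NsOf_mem_neg numbers a ha; simp; omega),
      List.filter_eq_self.mpr (fun a ha => by simpa using ZfOf_mem_zero numbers a ha),
      List.filter_eq_nil_iff.mpr (fun a ha => by
        have := PsOf_mem_pos numbers a ha; simp; omega)]
    simp
  rw [hfneg, hfzero]
  have hneg := negLoop_spec Ns [] (Zf ++ Ps) 0
  simp only [List.nil_append, List.length_nil, zero_add] at hneg
  rw [hneg]
  dsimp only
  -- value of t2, by cases on the parity of the negative block and emptiness of the zero block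
  have hposrun : ∀ t2v : Int,
      posLoop (Ns ++ (Zf ++ Ps)) ((Ns.length + Zf.length : Nat) : Int) t2v
          ((((Ns ++ (Zf ++ Ps)).length : Nat) : Int) - 1)
        = (t2v + pairM Ps.reverse, (((Ns ++ Zf).length : Nat) : Int) - 1 + ((Ps.reverse.length % 2 : Nat) : Int)) := by
    intro t2v
    have hshape : Ns ++ (Zf ++ Ps) = (Ns ++ Zf) ++ ((Ps.reverse).reverse ++ []) := by simp
    have hlo : ((Ns.length + Zf.length : Nat) : Int) = (((Ns ++ Zf).length : Nat) : Int) := by simp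
    have hj0 : (((Ns ++ (Zf ++ Ps)).length : Nat) : Int) - 1
        = (((Ns ++ Zf).length : Nat) : Int) + ((Ps.reverse).length : Nat) - 1 := by
      simp; ring
    rw [hlo, hj0]
    conv_lhs => rw [hshape]
    exact posLoop_spec (Ps.reverse) (Ns ++ Zf) [] t2v
  have hfinget : Ps.length % 2 = 1 →
      PySem.List.pyGetD (Ns ++ (Zf ++ Ps)) ((((Ns ++ Zf).length : Nat) : Int) - 1 + ((Ps.reverse.length % 2 : Nat) : Int)) 0
        = Ps.head?.getD 0 := by
    intro hoP
    have hPne : Ps ≠ [] := by intro hh; rw [hh] at hoP; simp at hoP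
    match Ps, hPne with
    | p0 :: pt, _ =>
      have hidx : (((Ns ++ Zf).length : Nat) : Int) - 1 + (((p0 :: pt).reverse.length % 2 : Nat) : Int)
          = (((Ns ++ Zf).length : Nat) : Int) := by
        simp only [List.length_reverse, List.length_cons]
        have h1 : (pt.length + 1) % 2 = 1 := by simpa using hoP
        rw [h1]; push_cast; ring
      have hsp : Ns ++ (Zf ++ p0 :: pt) = (Ns ++ Zf) ++ (p0 :: pt) := by simp
      rw [hidx, hsp, pyGetD_prefix]
      simp
  -- the t2 branch
  by_cases hoN : Ns.length % 2 = 1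
  · by_cases hz : Zf = []
    · have hc1 : Ns.length - Ns.length % 2 < Ns.length ∧ Zf.length = 0 := by
        refine ⟨by omega, by rw [hz]; rfl⟩
      rw [if_pos hc1]
      have hNne : Ns ≠ [] := by intro hh; rw [hh] at hoN; simp at hoN
      have hidx : Ns.length - Ns.length % 2 = Ns.length - 1 := by omega
      rw [hidx, pyGetD_block_last Ns (Zf ++ Ps) hNne]
      rw [hposrun]
      by_cases hoP : Ps.length % 2 = 1
      · rw [if_pos (by simp only [List.length_reverse, List.length_append]; push_cast; omega),
          if_pos hoP, if_pos ⟨hoN, hz⟩, hfinget hoP]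
      · rw [if_neg (by
            simp only [List.length_reverse, List.length_append]; push_cast; omega), if_neg hoP, if_pos ⟨hoN, hz⟩]
        ring
    · have hc1 : ¬ (Ns.length - Ns.length % 2 < Ns.length ∧ Zf.length = 0) := by
        rintro ⟨-, h2⟩
        exact hz (List.length_eq_zero_iff.1 h2)
      rw [if_neg hc1, hposrun]
      by_cases hoP : Ps.length % 2 = 1
      · rw [if_pos (by simp only [List.length_reverse, List.length_append]; push_cast; omega),
          if_pos hoP, if_neg (fun hcc => hz hcc.2), hfinget hoP]
        ring
      · rw [if_neg (by
            simp only [List.length_reverse, List.length_append]; push_cast; omega), if_neg hoP, if_neg (fun hcc => hz hcc.2)]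
        ring
  · have hc1 : ¬ (Ns.length - Ns.length % 2 < Ns.length ∧ Zf.length = 0) := by
      rintro ⟨h1, -⟩; omega
    rw [if_neg hc1, hposrun]
    by_cases hoP : Ps.length % 2 = 1
    · rw [if_pos (by simp only [List.length_reverse, List.length_append]; push_cast; omega),
        if_pos hoP, if_neg (fun hcc => hoN hcc.1), hfinget hoP]
      ring
    · rw [if_neg (by
          simp only [List.length_reverse, List.length_append]; push_cast; omega), if_neg hoP, if_neg (fun hcc => hoN hcc.1)]
      ring

-- ===== VERDICT (by name: the statement is the Claim_ definition above) =====
theorem solution_spec : Claim_equal_solution := by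
  intro N numbers _
  unfold Spec_solution
  rw [solution_eq, alt_eq]
  have hmemN := NsOf_mem_neg numbers
  have hmemN' : ∀ x ∈ (NsOf numbers).dropLast, x < 0 :=
    fun x hx => hmemN x ((List.dropLast_sublist _).subset hx)
  rw [pairF_eq_pairM_add (PsOf numbers).reverse, List.getLast?_reverse, List.length_reverse,
    pairF_eq_pairM_add (NsOf numbers), pairF_eq_pairM_add (NsOf numbers).dropLast,
    pairM_eq_pairE _ hmemN, pairM_eq_pairE _ hmemN']
  have hlendl : (NsOf numbers).dropLast.length = (NsOf numbers).length - 1 :=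
    List.length_dropLast
  by_cases hoN : (NsOf numbers).length % 2 = 1
  · rw [pairE_dropLast (NsOf numbers) hoN]
    split_ifs with h1 h2 h3 h4 h5 h6 h7 h8 <;> first
      | (exfalso; omega)
      | (exfalso; tauto)
      | ring
  · split_ifs with h1 h2 h3 h4 h5 h6 h7 h8 <;> first
      | (exfalso; omega)
      | (exfalso; tauto)
      | ring
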